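-- pv_equiv track=rewrite | github.com/artiom43/python_2022 | 03.1.FunctionsStringsIO/count_util/count_util.py | count_util
-- ===== SOURCE A (Python) =====
-- def count_util(text: str, flags: str | None = None) -> dict[str, int]:
--     """
--     :param text: text to count entities
--     :param flags: flags in command-like format - can be:
--         * -m stands for counting characters
--         * -l stands for counting lines
--         * -L stands for getting length of the longest line
--         * -w stands for counting words
--     More than one flag can be passed at the same time, for example:
--         * "-l -m"
--         * "-lLw"
--     Ommiting flags or passing empty string is equivalent to "-mlLw"
--     :return: mapping from string keys to corresponding counter, where
--     keys are selected according to the received flags: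
--         * "chars" - amount of characters
--         * "lines" - amount of lines
--         * "longest_line" - the longest line length
--         * "words" - amount of words
--     """
--     if flags is None or flags == "":
--         flags = "-mlLw"
--     answer_dict = {}
--     if "m" in flags:
--         answer_dict["chars"] = len(text)
--     if "l" in flags:
--         answer_dict["lines"] = len(text.split("\n")) - 1
--     if "L" in flags:
--         splitted_text = text.split("\n")
--         answer_dict["longest_line"] = max([len(el_str) for el_str in splitted_text])
--     if "w" in flags:
--         answer_dict["words"] = len(text.split())
--     return answer_dict
-- ===== SOURCE B (Python) =====
-- def count_util(text: str, flags: str | None = None) -> dict[str, int]: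
--     active = flags if flags else "-mlLw"
--     chars = 0
--     newlines = 0
--     cur = 0
--     longest = 0
--     for ch in text:
--         chars += 1
--         if ch == "\n":
--             newlines += 1
--             if cur > longest:
--                 longest = cur
--             cur = 0
--         else:
--             cur += 1
--     if cur > longest:
--         longest = cur
--     answer = {}
--     if "m" in active:
--         answer["chars"] = chars
--     if "l" in active:
--         answer["lines"] = newlines
--     if "L" in active:
--         answer["longest_line"] = longest
--     if "w" in active:
--         answer["words"] = len(text.split())
--     return answer
-- ===== Notes on version B (the rewrite author's own statement) =====
-- stated objective: alternative
-- what changed: A splits the text on '\n' (twice) and takes len/max over the pieces; B makes one character-by-character scan maintaining char count, newline count, current-line length and running max line length, keeping only words as len(text.split()).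
import Mathlib
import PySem

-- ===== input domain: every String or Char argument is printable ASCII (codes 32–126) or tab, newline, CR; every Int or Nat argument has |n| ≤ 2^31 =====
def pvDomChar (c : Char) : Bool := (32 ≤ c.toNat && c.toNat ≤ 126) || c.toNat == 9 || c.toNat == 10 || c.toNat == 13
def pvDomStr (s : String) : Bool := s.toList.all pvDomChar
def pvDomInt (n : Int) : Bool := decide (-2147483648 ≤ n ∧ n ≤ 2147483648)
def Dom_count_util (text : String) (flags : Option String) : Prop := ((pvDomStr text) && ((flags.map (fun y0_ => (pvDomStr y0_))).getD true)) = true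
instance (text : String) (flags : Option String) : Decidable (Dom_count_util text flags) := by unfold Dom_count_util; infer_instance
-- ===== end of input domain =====

-- B replaces A's repeated text.split("\n") passes by one character-by-character scan maintaining
-- char count, newline count, current-line length and max line length (objective: alternative single-pass decomposition).


-- ===== PORT A =====
-- string primitives ported through PySem.Chars on text.toList (the exact List Char forms of the PySem string API)
def count_util (text : String) (flags : Option String) : List (String × Int) :=
  -- `if flags is None or flags == "": flags = "-mlLw"`
  let fl : String := match flags with
    | none => "-mlLw"
    | some f => if f = "" then "-mlLw" else f
  let d : PySem.Dict String Int := PySem.Dict.empty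
  let d := if PySem.Str.isIn "m" fl then PySem.Dict.insert d "chars" (PySem.Str.len text) else d
  let d := if PySem.Str.isIn "l" fl then
      PySem.Dict.insert d "lines" (((PySem.Chars.splitOn text.toList ['\n']).length : Int) - 1)
    else d
  let d := if PySem.Str.isIn "L" fl then
      let splitted := PySem.Chars.splitOn text.toList ['\n']
      -- Python's max([...]) raises only on an empty list, which split never returns: `.getD 0` is unreachable
      PySem.Dict.insert d "longest_line"
        ((PySem.List.max? (splitted.map (fun el => (el.length : Int))) (fun x => x)).getD 0)
    else d
  let d := if PySem.Str.isIn "w" fl then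
      PySem.Dict.insert d "words" ((PySem.Chars.split₀ text.toList).length : Int)
    else d
  d.items

-- ===== PORT B =====
def count_util_alt (text : String) (flags : Option String) : List (String × Int) :=
  -- `active = flags if flags else "-mlLw"`
  let active : String := match flags with
    | none => "-mlLw"
    | some f => if f = "" then "-mlLw" else f
  -- the single scan; state s = (chars, newlines, cur, longest)
  let st : Int × Int × Int × Int :=
    text.toList.foldl
      (fun (s : Int × Int × Int × Int) (c : Char) =>
        if c = '\n' then (s.1 + 1, s.2.1 + 1, (0 : Int), if s.2.2.1 > s.2.2.2 then s.2.2.1 else s.2.2.2)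
        else (s.1 + 1, s.2.1, s.2.2.1 + 1, s.2.2.2))
      ((0, 0, 0, 0) : Int × Int × Int × Int)
  let longest := if st.2.2.1 > st.2.2.2 then st.2.2.1 else st.2.2.2
  let answer : PySem.Dict String Int := PySem.Dict.empty
  let answer := if PySem.Str.isIn "m" active then PySem.Dict.insert answer "chars" st.1 else answer
  let answer := if PySem.Str.isIn "l" active then PySem.Dict.insert answer "lines" st.2.1 else answer
  let answer := if PySem.Str.isIn "L" active then PySem.Dict.insert answer "longest_line" longest else answer
  let answer := if PySem.Str.isIn "w" active then
      PySem.Dict.insert answer "words" ((PySem.Chars.split₀ text.toList).length : Int)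
    else answer
  answer.items

-- ===== PRECONDITION & SPEC =====
def Spec_count_util (text : String) (flags : Option String) (out : List (String × Int)) : Prop := out = count_util_alt text flags
instance (text : String) (flags : Option String) (out : List (String × Int)) : Decidable (Spec_count_util text flags out) := by unfold Spec_count_util; infer_instance

-- ===== CLAIM (what is proved, stated in full; the proofs are below) =====
def Claim_equal_count_util : Prop := ∀ (text : String) (flags : Option String), Dom_count_util text flags → Spec_count_util text flags (count_util text flags)

-- ===== LEMMAS AND PROOFS =====

-- the pieces of cs split at '\n', with cur the already-read start of the first piece
def pvPieces (cur : List Char) : List Char → List (List Char)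
  | [] => [cur]
  | c :: rest => if c = '\n' then cur :: pvPieces [] rest else pvPieces (cur ++ [c]) rest

-- max piece length, k = length of the already-read part of the current piece
def pvMaxLens (k : Int) : List Char → Int
  | [] => k
  | c :: rest => if c = '\n' then max k (pvMaxLens 0 rest) else pvMaxLens (k + 1) rest

lemma splitOn_go_eq (l : List Char) : ∀ (fuel : Nat) (cur : List Char) (acc : List (List Char)),
    l.length < fuel →
    PySem.Chars.splitOn.go ['\n'] fuel l cur acc = acc.reverse ++ pvPieces cur.reverse l := by
  induction l with
  | nil =>
    intro fuel cur acc h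
    match fuel, h with
    | fuel + 1, _ => simp [PySem.Chars.splitOn.go, pvPieces]
  | cons c rest ih =>
    intro fuel cur acc h
    match fuel, h with
    | fuel + 1, h =>
      by_cases hc : c = '\n'
      · subst hc
        have hpre : List.isPrefixOf ['\n'] ('\n' :: rest) = true := by simp [List.isPrefixOf]
        simp only [PySem.Chars.splitOn.go, hpre, if_pos]
        rw [show List.drop (['\n'].length) ('\n' :: rest) = rest from rfl]
        rw [ih fuel [] (cur.reverse :: acc) (by simpa using Nat.lt_of_succ_lt_succ h)]
        simp [pvPieces]
      · have hpre : List.isPrefixOf ['\n'] (c :: rest) = false := by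
          simp [List.isPrefixOf]
          intro hcontra
          exact absurd hcontra.symm hc
        simp only [PySem.Chars.splitOn.go, hpre, Bool.false_eq_true, if_neg, not_false_iff]
        rw [ih fuel (c :: cur) acc (by simpa using Nat.lt_of_succ_lt_succ h)]
        simp [pvPieces, hc]

lemma splitOn_eq_pvPieces (cs : List Char) :
    PySem.Chars.splitOn cs ['\n'] = pvPieces [] cs := by
  have := splitOn_go_eq cs (cs.length + 1) [] [] (by omega)
  simpa [PySem.Chars.splitOn] using this

lemma pvPieces_length (cs : List Char) : ∀ cur, (pvPieces cur cs).length = cs.count '\n' + 1 := by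
  induction cs with
  | nil => intro cur; simp [pvPieces]
  | cons c rest ih =>
    intro cur
    by_cases hc : c = '\n'
    · subst hc; simp [pvPieces, ih]
    · simp [pvPieces, hc, ih]

lemma pvFoldl_max (t : List Int) : ∀ (a b : Int), t.foldl max (max a b) = max a (t.foldl max b) := by
  induction t with
  | nil => intro a b; simp
  | cons x t ih =>
    intro a b
    simp only [List.foldl_cons, max_assoc]
    exact ih a (max b x)

lemma pvMax?_pieces (cs : List Char) : ∀ (cur : List Char),
    PySem.List.max? ((pvPieces cur cs).map (fun el => (el.length : Int))) (fun x => x)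
      = some (pvMaxLens (cur.length : Int) cs) := by
  induction cs with
  | nil => intro cur; simp [pvPieces, pvMaxLens, PySem.List.max?]
  | cons c rest ih =>
    intro cur
    by_cases hc : c = '\n'
    · subst hc
      simp only [pvPieces, List.map_cons, pvMaxLens, if_true]
      rw [PySem.List.max?_id_cons]
      rcases hshape : (pvPieces ([] : List Char) rest).map (fun el => (el.length : Int)) with _ | ⟨x, t⟩
      · exfalso
        have hl : ((pvPieces ([] : List Char) rest).map (fun el => (el.length : Int))).length
            = rest.count '\n' + 1 := by simpa using pvPieces_length rest []
        rw [hshape] at hl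
        simp at hl
      · have h0 := ih []
        rw [hshape, PySem.List.max?_id_cons] at h0
        have hx : t.foldl max x = pvMaxLens 0 rest := by simpa using h0
        rw [hshape]
        congr 1
        calc (x :: t).foldl max (cur.length : Int)
            = t.foldl max (max (cur.length : Int) x) := by simp
          _ = max (cur.length : Int) (t.foldl max x) := pvFoldl_max t _ x
          _ = max (cur.length : Int) (pvMaxLens 0 rest) := by rw [hx]
    · simp only [pvPieces, if_neg hc, pvMaxLens]
      rw [ih (cur ++ [c])]
      congr 2
      simp

lemma pvMaxLens_le (cs : List Char) : ∀ (k : Int), k ≤ pvMaxLens k cs := by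
  induction cs with
  | nil => intro k; simp [pvMaxLens]
  | cons c rest ih =>
    intro k
    by_cases hc : c = '\n'
    · subst hc; simp [pvMaxLens]
    · simp only [pvMaxLens, if_neg hc]
      have := ih (k + 1)
      omega

lemma pvScan (cs : List Char) : ∀ (ch nl cur long : Int),
    (List.foldl
      (fun (s : Int × Int × Int × Int) (c : Char) =>
        if c = '\n' then (s.1 + 1, s.2.1 + 1, (0 : Int), if s.2.2.1 > s.2.2.2 then s.2.2.1 else s.2.2.2)
        else (s.1 + 1, s.2.1, s.2.2.1 + 1, s.2.2.2))
      (ch, nl, cur, long) cs).1 = ch + cs.length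
  ∧ (List.foldl
      (fun (s : Int × Int × Int × Int) (c : Char) =>
        if c = '\n' then (s.1 + 1, s.2.1 + 1, (0 : Int), if s.2.2.1 > s.2.2.2 then s.2.2.1 else s.2.2.2)
        else (s.1 + 1, s.2.1, s.2.2.1 + 1, s.2.2.2))
      (ch, nl, cur, long) cs).2.1 = nl + cs.count '\n'
  ∧ (max ((List.foldl
      (fun (s : Int × Int × Int × Int) (c : Char) =>
        if c = '\n' then (s.1 + 1, s.2.1 + 1, (0 : Int), if s.2.2.1 > s.2.2.2 then s.2.2.1 else s.2.2.2)
        else (s.1 + 1, s.2.1, s.2.2.1 + 1, s.2.2.2))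
      (ch, nl, cur, long) cs).2.2.2) ((List.foldl
      (fun (s : Int × Int × Int × Int) (c : Char) =>
        if c = '\n' then (s.1 + 1, s.2.1 + 1, (0 : Int), if s.2.2.1 > s.2.2.2 then s.2.2.1 else s.2.2.2)
        else (s.1 + 1, s.2.1, s.2.2.1 + 1, s.2.2.2))
      (ch, nl, cur, long) cs).2.2.1)) = max long (pvMaxLens cur cs) := by
  induction cs with
  | nil =>
    intro ch nl cur long
    refine ⟨by simp, by simp, ?_⟩
    simp only [List.foldl_nil, pvMaxLens]
  | cons c rest ih =>
    intro ch nl cur long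
    by_cases hc : c = '\n'
    · subst hc
      obtain ⟨i1, i2, i3⟩ := ih (ch + 1) (nl + 1) 0 (if cur > long then cur else long)
      refine ⟨?_, ?_, ?_⟩
      · simp only [List.foldl_cons, if_true] at i1 ⊢
        rw [i1]; push_cast [List.length_cons]; ring
      · simp only [List.foldl_cons, if_true] at i2 ⊢
        rw [i2]; simp; ring
      · simp only [List.foldl_cons, if_true] at i3 ⊢
        rw [i3]
        simp only [pvMaxLens, if_true]
        have h1 : (if cur > long then cur else long) = max long cur := by omega
        rw [h1, max_assoc]
    · obtain ⟨i1, i2, i3⟩ := ih (ch + 1) nl (cur + 1) long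
      refine ⟨?_, ?_, ?_⟩
      · simp only [List.foldl_cons, if_neg hc] at i1 ⊢
        rw [i1]; push_cast [List.length_cons]; ring
      · simp only [List.foldl_cons, if_neg hc] at i2 ⊢
        rw [i2]; simp [hc]
      · simp only [List.foldl_cons, if_neg hc] at i3 ⊢
        rw [i3]
        simp [pvMaxLens, hc]

-- ===== VERDICT (by name: the statement is the Claim_ definition above) =====
theorem count_util_spec : Claim_equal_count_util := by
  intro text flags _
  unfold Spec_count_util count_util count_util_alt
  obtain ⟨h1, h2, h3⟩ := pvScan text.toList 0 0 0 0
  have hm : PySem.Str.len text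
      = (List.foldl
          (fun (s : Int × Int × Int × Int) (c : Char) =>
            if c = '\n' then (s.1 + 1, s.2.1 + 1, (0 : Int), if s.2.2.1 > s.2.2.2 then s.2.2.1 else s.2.2.2)
            else (s.1 + 1, s.2.1, s.2.2.1 + 1, s.2.2.2))
          ((0, 0, 0, 0) : Int × Int × Int × Int) text.toList).1 := by
    rw [h1]; simp [PySem.Str.len]
  have hl : ((PySem.Chars.splitOn text.toList ['\n']).length : Int) - 1
      = (List.foldl
          (fun (s : Int × Int × Int × Int) (c : Char) =>
            if c = '\n' then (s.1 + 1, s.2.1 + 1, (0 : Int), if s.2.2.1 > s.2.2.2 then s.2.2.1 else s.2.2.2)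
            else (s.1 + 1, s.2.1, s.2.2.1 + 1, s.2.2.2))
          ((0, 0, 0, 0) : Int × Int × Int × Int) text.toList).2.1 := by
    rw [h2, splitOn_eq_pvPieces, pvPieces_length text.toList []]
    push_cast
    ring
  have hb : (if (List.foldl
          (fun (s : Int × Int × Int × Int) (c : Char) =>
            if c = '\n' then (s.1 + 1, s.2.1 + 1, (0 : Int), if s.2.2.1 > s.2.2.2 then s.2.2.1 else s.2.2.2)
            else (s.1 + 1, s.2.1, s.2.2.1 + 1, s.2.2.2))
          ((0, 0, 0, 0) : Int × Int × Int × Int) text.toList).2.2.1 > (List.foldl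
          (fun (s : Int × Int × Int × Int) (c : Char) =>
            if c = '\n' then (s.1 + 1, s.2.1 + 1, (0 : Int), if s.2.2.1 > s.2.2.2 then s.2.2.1 else s.2.2.2)
            else (s.1 + 1, s.2.1, s.2.2.1 + 1, s.2.2.2))
          ((0, 0, 0, 0) : Int × Int × Int × Int) text.toList).2.2.2
        then (List.foldl
          (fun (s : Int × Int × Int × Int) (c : Char) =>
            if c = '\n' then (s.1 + 1, s.2.1 + 1, (0 : Int), if s.2.2.1 > s.2.2.2 then s.2.2.1 else s.2.2.2)
            else (s.1 + 1, s.2.1, s.2.2.1 + 1, s.2.2.2))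
          ((0, 0, 0, 0) : Int × Int × Int × Int) text.toList).2.2.1
        else (List.foldl
          (fun (s : Int × Int × Int × Int) (c : Char) =>
            if c = '\n' then (s.1 + 1, s.2.1 + 1, (0 : Int), if s.2.2.1 > s.2.2.2 then s.2.2.1 else s.2.2.2)
            else (s.1 + 1, s.2.1, s.2.2.1 + 1, s.2.2.2))
          ((0, 0, 0, 0) : Int × Int × Int × Int) text.toList).2.2.2)
      = max (0 : Int) (pvMaxLens 0 text.toList) := by
    rw [← h3]
    omega
  have hLv : ((PySem.List.max? ((PySem.Chars.splitOn text.toList ['\n']).map (fun el => (el.length : Int)))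
        (fun x => x)).getD 0) = max (0 : Int) (pvMaxLens 0 text.toList) := by
    rw [splitOn_eq_pvPieces, pvMax?_pieces text.toList []]
    have := pvMaxLens_le text.toList 0
    simp
    omega
  simp only [hm, hl, hLv, hb]
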